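-- pv_equiv track=rewrite | github.com/108806/web_link_dl | web_link_dl.py | FNG
-- ===== SOURCE A (Python) =====
-- def FNG(site:str):
--     """[FOLDER NAME GENERATOR.
--         Creates a str depending on the str given]
--     Args:
--         site ([type]): [https://example.com:3445]
--     Returns:
--         str: [https___example_com_3445]
--     """
--     result_str = ''
--     for x in list(site):
--         if x.isalnum() : result_str += x
--         else:
--             if result_str.endswith('_') or result_str.endswith('@'): continue
--             if x == ':' :
--                 result_str += "@"
--                 continue
--             result_str += '_'
--     return result_str
-- ===== SOURCE B (Python) =====
-- def FNG(site: str):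
--     """[FOLDER NAME GENERATOR.] Run-grouping re-implementation: split the
--     input into maximal runs of equal isalnum()-ness; keep alnum runs verbatim,
--     collapse each non-alnum run to one separator chosen by its first char."""
--     pieces = []
--     i, n = 0, len(site)
--     while i < n:
--         alnum = site[i].isalnum()
--         j = i
--         while j < n and site[j].isalnum() == alnum:
--             j += 1
--         pieces.append(site[i:j] if alnum else ('@' if site[i] == ':' else '_'))
--         i = j
--     return ''.join(pieces)
-- ===== Notes on version B (the rewrite author's own statement) =====
-- stated objective: idiomatic
-- what changed: Replaced the per-character endswith-based state machine with explicit grouping into maximal runs of equal isalnum-ness: alnum runs are kept verbatim, each non-alnum run collapses to one separator chosen by its first character, and the pieces are joined.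
import Mathlib
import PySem

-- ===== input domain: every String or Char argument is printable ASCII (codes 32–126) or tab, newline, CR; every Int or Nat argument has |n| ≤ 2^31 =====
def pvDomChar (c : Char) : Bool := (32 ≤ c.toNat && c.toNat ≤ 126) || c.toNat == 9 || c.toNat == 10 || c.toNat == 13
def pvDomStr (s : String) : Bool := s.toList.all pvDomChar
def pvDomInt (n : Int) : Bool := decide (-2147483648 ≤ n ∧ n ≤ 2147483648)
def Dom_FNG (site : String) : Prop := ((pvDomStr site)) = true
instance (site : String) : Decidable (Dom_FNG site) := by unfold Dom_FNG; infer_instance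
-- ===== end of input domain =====

-- B replaces A's per-character endswith state machine by grouping into maximal runs of equal isalnum-ness (idiomatic decomposition).

-- ===== PORT A =====
-- A's loop: result accumulates chars; non-alnum chars are skipped when the
-- result already ends with '_' or '@' (Python ''.endswith('_') is False ↔ getLast? = none).
def FNGloop (acc : List Char) : List Char → List Char
  | [] => acc
  | x :: xs =>
    if PySem.Chars.isalnum x then FNGloop (acc ++ [x]) xs
    else if acc.getLast? = some '_' ∨ acc.getLast? = some '@' then FNGloop acc xs
    else if x = ':' then FNGloop (acc ++ ['@']) xs
    else FNGloop (acc ++ ['_']) xs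

def FNG (site : String) : String := String.ofList (FNGloop [] site.toList)

-- ===== PORT B =====
-- maximal runs of equal isalnum-ness
def FNGruns : List Char → List (List Char)
  | [] => []
  | x :: xs =>
    (x :: xs.takeWhile (fun y => PySem.Chars.isalnum y == PySem.Chars.isalnum x)) ::
      FNGruns (xs.dropWhile (fun y => PySem.Chars.isalnum y == PySem.Chars.isalnum x))
termination_by l => l.length
decreasing_by simpa using Nat.lt_succ_of_le (List.length_dropWhile_le _ _)

-- piece contributed by a run: verbatim if alnum, else one separator from its first char
def FNGpiece (r : List Char) : List Char :=
  match r with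
  | [] => []
  | x :: _ => if PySem.Chars.isalnum x then r else if x = ':' then ['@'] else ['_']

def FNG_alt (site : String) : String :=
  String.ofList (((FNGruns site.toList).map FNGpiece).flatten)

-- ===== PRECONDITION & SPEC =====
def Spec_FNG (site : String) (out : String) : Prop := out = FNG_alt site
instance (site : String) (out : String) : Decidable (Spec_FNG site out) := by unfold Spec_FNG; infer_instance

-- ===== CLAIM (what is proved, stated in full; the proofs are below) =====
def Claim_equal_FNG : Prop := ∀ (site : String), Dom_FNG site → Spec_FNG site (FNG site)

-- ===== LEMMAS AND PROOFS =====

-- consuming a run of alnum chars just appends it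
theorem FNGloop_consume (r : List Char) (h : ∀ c ∈ r, PySem.Chars.isalnum c = true) :
    ∀ acc rest, FNGloop acc (r ++ rest) = FNGloop (acc ++ r) rest := by
  induction r with
  | nil => simp
  | cons x xs ih =>
    intro acc rest
    have hx : PySem.Chars.isalnum x = true := h x (by simp)
    simp only [List.cons_append, FNGloop, hx, if_true]
    rw [ih (fun c hc => h c (by simp [hc])) (acc ++ [x]) rest]
    simp

-- a run of non-alnum chars is skipped entirely when acc already ends with a separator
theorem FNGloop_skip (r : List Char) (h : ∀ c ∈ r, PySem.Chars.isalnum c = false) :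
    ∀ acc rest, (acc.getLast? = some '_' ∨ acc.getLast? = some '@') →
    FNGloop acc (r ++ rest) = FNGloop acc rest := by
  induction r with
  | nil => simp
  | cons x xs ih =>
    intro acc rest hacc
    have hx : PySem.Chars.isalnum x = false := h x (by simp)
    simp only [List.cons_append, FNGloop, hx, Bool.false_eq_true, if_false, if_pos hacc]
    exact ih (fun c hc => h c (by simp [hc])) acc rest hacc

theorem FNG_main : ∀ (n : ℕ) (l acc : List Char), l.length ≤ n →
    ((∃ x, l.head? = some x ∧ PySem.Chars.isalnum x = false) →
      acc.getLast? ≠ some '_' ∧ acc.getLast? ≠ some '@') →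
    FNGloop acc l = acc ++ ((FNGruns l).map FNGpiece).flatten := by
  intro n
  induction n with
  | zero =>
    intro l acc hl _
    have : l = [] := List.eq_nil_of_length_eq_zero (Nat.le_zero.mp hl)
    subst this; simp [FNGloop, FNGruns]
  | succ n ih =>
    intro l acc hl hok
    match l with
    | [] => simp [FNGloop, FNGruns]
    | x :: xs =>
      set p := fun y => PySem.Chars.isalnum y == PySem.Chars.isalnum x with hp
      have htake : ∀ c ∈ xs.takeWhile p, PySem.Chars.isalnum c = PySem.Chars.isalnum x := by
        intro c hc
        have := List.mem_takeWhile_imp hc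
        simpa [hp] using this
      have hdroplen : (xs.dropWhile p).length ≤ n := by
        have := List.length_dropWhile_le p xs
        have hxs : xs.length ≤ n := Nat.le_of_succ_le_succ hl
        omega
      have hdrophead : ∀ y, (xs.dropWhile p).head? = some y →
          PySem.Chars.isalnum y ≠ PySem.Chars.isalnum x := by
        intro y hy
        have := List.head?_dropWhile_not p xs
        rw [hy] at this
        simpa [hp] using this
      by_cases hx : PySem.Chars.isalnum x = true
      · -- alnum run
        have hrun : ∀ c ∈ x :: xs.takeWhile p, PySem.Chars.isalnum c = true := by
          intro c hc
          rcases List.mem_cons.mp hc with h | h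
          · subst h; exact hx
          · rw [htake c h]; exact hx
        have hsplit : x :: xs = (x :: xs.takeWhile p) ++ xs.dropWhile p := by
          simp [List.takeWhile_append_dropWhile]
        conv_lhs => rw [hsplit]
        rw [FNGloop_consume _ hrun acc (xs.dropWhile p)]
        have hok' : (∃ y, (xs.dropWhile p).head? = some y ∧ PySem.Chars.isalnum y = false) →
            (acc ++ (x :: xs.takeWhile p)).getLast? ≠ some '_' ∧
            (acc ++ (x :: xs.takeWhile p)).getLast? ≠ some '@' := by
          intro _
          have hne : (x :: xs.takeWhile p) ≠ [] := by simp
          rw [List.getLast?_append_of_ne_nil _ hne]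
          have hc := List.getLast?_eq_some_getLast (l := x :: xs.takeWhile p) hne
          have hcm := List.getLast_mem (l := x :: xs.takeWhile p) hne
          have := hrun _ hcm
          constructor <;> (rw [hc]; intro hcon; injection hcon with h; rw [h] at this; exact absurd this (by decide))
        rw [ih (xs.dropWhile p) _ hdroplen hok']
        have hpiece : FNGpiece (x :: xs.takeWhile p) = x :: xs.takeWhile p := by
          simp [FNGpiece, hx]
        simp only [FNGruns, List.map_cons, List.flatten_cons, ← hp]
        rw [hpiece]; simp
      · -- non-alnum run: emit one separator, skip the rest of the run
        have hx' : PySem.Chars.isalnum x = false := by simpa using hx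
        have hok2 := hok ⟨x, rfl, hx'⟩
        have hskipr : ∀ c ∈ xs.takeWhile p, PySem.Chars.isalnum c = false := by
          intro c hc; rw [htake c hc]; exact hx'
        have hsplit : xs = xs.takeWhile p ++ xs.dropWhile p := by
          simp [List.takeWhile_append_dropWhile]
        set s : Char := if x = ':' then '@' else '_' with hs
        have hstep : FNGloop acc (x :: xs) = FNGloop (acc ++ [s]) xs := by
          simp only [FNGloop, hx', Bool.false_eq_true, if_false,
            if_neg (not_or.mpr hok2), hs]
          split <;> rfl
        have hsep : (acc ++ [s]).getLast? = some '_' ∨ (acc ++ [s]).getLast? = some '@' := by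
          rw [hs]; by_cases hc : x = ':' <;> simp [hc]
        rw [hstep]
        conv_lhs => rw [hsplit]
        rw [FNGloop_skip _ hskipr _ _ hsep]
        have hok' : (∃ y, (xs.dropWhile p).head? = some y ∧ PySem.Chars.isalnum y = false) →
            (acc ++ [s]).getLast? ≠ some '_' ∧ (acc ++ [s]).getLast? ≠ some '@' := by
          rintro ⟨y, hy, hyf⟩
          exact absurd (by rw [hyf, hx']) (hdrophead y hy)
        rw [ih (xs.dropWhile p) _ hdroplen hok']
        have hpiece : FNGpiece (x :: xs.takeWhile p) = [s] := by
          simp only [FNGpiece, hx', Bool.false_eq_true, if_false, hs]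
          split <;> rfl
        simp only [FNGruns, List.map_cons, List.flatten_cons, ← hp]
        rw [hpiece]; simp

-- ===== VERDICT (by name: the statement is the Claim_ definition above) =====
theorem FNG_spec : Claim_equal_FNG := by
  intro site _
  unfold Spec_FNG FNG FNG_alt
  rw [FNG_main site.toList.length site.toList [] le_rfl (by intro _; simp)]
  simp
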